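-- pv_equiv track=rewrite | github.com/siddhusalvi/python-data-structure | list/sort_by_first.py | list_by_chr
-- ===== SOURCE A (Python) =====
-- def list_by_chr(given_list):
--     new_list = []
--     for x in given_list:
--         if x[0] not in new_list:
--             new_list.append(x[0])
--             for y in given_list:
--                 if x[0] == y[0]:
--                     new_list.append(y)
--     return new_list
-- ===== SOURCE B (Python) =====
-- def list_by_chr(given_list):
--     groups = {}
--     for x in given_list:
--         groups.setdefault(x[0], []).append(x)
--     out = []
--     for key, members in groups.items():
--         out.append(key)
--         out += members
--     return out
-- ===== Notes on version B (the rewrite author's own statement) =====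
-- stated objective: faster
-- what changed: Replaced A's nested rescans (membership test on the growing output plus an inner full scan per new key) by one pass building an insertion-ordered dict of groups keyed by the first character, then a flatten pass.
import Mathlib
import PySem

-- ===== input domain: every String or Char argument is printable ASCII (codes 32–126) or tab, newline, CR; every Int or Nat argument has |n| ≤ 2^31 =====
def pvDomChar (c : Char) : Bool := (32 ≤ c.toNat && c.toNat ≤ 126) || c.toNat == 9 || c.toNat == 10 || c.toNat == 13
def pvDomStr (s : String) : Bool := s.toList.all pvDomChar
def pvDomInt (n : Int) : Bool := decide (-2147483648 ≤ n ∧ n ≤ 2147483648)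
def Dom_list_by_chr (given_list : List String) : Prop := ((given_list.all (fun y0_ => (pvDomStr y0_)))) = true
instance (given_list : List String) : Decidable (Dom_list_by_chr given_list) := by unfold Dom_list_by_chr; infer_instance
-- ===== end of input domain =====

-- B builds the first-char groups in one dict pass and flattens, instead of A's quadratic rescans; same return value on lists of nonempty strings.


-- x[0] as a Python one-character string ("" only on the empty string, which Pre_ excludes)
def pyHead (x : String) : String :=
  match PySem.Str.pyGet? x 0 with
  | some c => String.ofList [c]
  | none => ""

-- ===== PORT A =====
def list_by_chr (given_list : List String) : List String :=
  given_list.foldl (fun new_list x =>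
    if new_list.contains (pyHead x) then new_list
    else given_list.foldl
      (fun acc y => if pyHead x == pyHead y then acc ++ [y] else acc)
      (new_list ++ [pyHead x])) []

-- ===== PORT B =====
def list_by_chr_alt (given_list : List String) : List String :=
  let groups : PySem.Dict String (List String) :=
    given_list.foldl (fun d x => d.modify (pyHead x) [] (· ++ [x])) PySem.Dict.empty
  groups.items.foldl (fun out p => (out ++ [p.1]) ++ p.2) []

-- ===== PRECONDITION & SPEC =====
-- Pre_ excludes lists containing the empty string, on which the Python A (and B) raises IndexError at x[0].
def Pre_list_by_chr (given_list : List String) : Prop := ∀ s ∈ given_list, s ≠ ""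
instance (given_list : List String) : Decidable (Pre_list_by_chr given_list) := by unfold Pre_list_by_chr; infer_instance
def pvWitness_list_by_chr : List String := ["ab", "b", "ac", "b"]
def Spec_list_by_chr (given_list : List String) (out : List String) : Prop := out = list_by_chr_alt given_list
instance (given_list : List String) (out : List String) : Decidable (Spec_list_by_chr given_list out) := by unfold Spec_list_by_chr; infer_instance

-- ===== CLAIM (what is proved, stated in full; the proofs are below) =====
def Claim_equal_list_by_chr : Prop := ∀ (given_list : List String), Dom_list_by_chr given_list → Pre_list_by_chr given_list → Spec_list_by_chr given_list (list_by_chr given_list)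

-- ===== LEMMAS AND PROOFS =====

theorem strBeqComm (a b : String) : (a == b) = (b == a) := by
  by_cases h : a = b
  · simp [h]
  · simp [h, mt Eq.symm h]

theorem pyHead_eq (x : String) :
    pyHead x = match x.toList[0]? with | some c => String.ofList [c] | none => "" := by
  unfold pyHead
  rw [show PySem.Str.pyGet? x 0 = x.toList[0]? from by
    simp [PySem.Str.pyGet?, PySem.List.pyGet?_zero]]

theorem pyHead_empty : pyHead "" = "" := by
  rw [pyHead_eq]; simp

theorem pyHead_singleton (c : Char) : pyHead (String.ofList [c]) = String.ofList [c] := by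
  rw [pyHead_eq]; simp

theorem pyHead_idem (x : String) : pyHead (pyHead x) = pyHead x := by
  rw [pyHead_eq x]
  cases h : x.toList[0]? with
  | none => exact pyHead_empty
  | some c => exact pyHead_singleton c

-- the reference value both ports are shown to compute
def refFlat (l : List String) (ks : List String) : List String :=
  ks.flatMap (fun c => c :: l.filter (fun x => pyHead x == c))

theorem mem_refFlat_iff (l ks : List String) (c : String) (hc : pyHead c = c) :
    c ∈ refFlat l ks ↔ c ∈ ks := by
  unfold refFlat
  simp only [List.mem_flatMap, List.mem_cons, List.mem_filter]
  constructor
  · rintro ⟨k, hk, hck | ⟨-, hbeq⟩⟩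
    · subst hck; exact hk
    · have hkc : pyHead c = k := by simpa [beq_iff_eq] using hbeq
      rw [hc] at hkc; subst hkc; exact hk
  · intro h; exact ⟨c, h, Or.inl rfl⟩

theorem refFlat_append_singleton (l ks : List String) (k : String) :
    refFlat l (ks ++ [k]) = refFlat l ks ++ (k :: l.filter (fun x => pyHead x == k)) := by
  simp [refFlat]

theorem listA_loop (l : List String) (rest : List String) (ks : List String)
    (hks : ∀ k ∈ ks, pyHead k = k) :
    rest.foldl (fun new_list x =>
      if new_list.contains (pyHead x) then new_list
      else l.foldl (fun acc y => if pyHead x == pyHead y then acc ++ [y] else acc)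
        (new_list ++ [pyHead x])) (refFlat l ks)
    = refFlat l (PySem.Set.update ks (rest.map pyHead)) := by
  induction rest generalizing ks with
  | nil => simp [PySem.Set.update_nil]
  | cons r rest ih =>
    simp only [List.foldl_cons, List.map_cons, PySem.Set.update_cons]
    by_cases hmem : pyHead r ∈ ks
    · have hcont : (refFlat l ks).contains (pyHead r) = true := by
        rw [List.contains_iff_mem, mem_refFlat_iff l ks _ (pyHead_idem r)]
        exact hmem
      rw [hcont]
      simp only [if_true]
      rw [PySem.Set.add_of_mem hmem]
      exact ih ks hks
    · have hcont : (refFlat l ks).contains (pyHead r) = false := by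
        rw [Bool.eq_false_iff, Ne, List.contains_iff_mem,
            mem_refFlat_iff l ks _ (pyHead_idem r)]
        exact hmem
      rw [hcont]
      simp only [Bool.false_eq_true, if_false]
      have hinner :
          l.foldl (fun acc y => if pyHead r == pyHead y then acc ++ [y] else acc)
            (refFlat l ks ++ [pyHead r])
          = refFlat l (ks ++ [pyHead r]) := by
        rw [show (fun acc y => if pyHead r == pyHead y then acc ++ [y] else acc)
              = (fun (acc : List String) y =>
                  if (fun y => pyHead y == pyHead r) y = true then acc ++ [id y] else acc) from by
            funext acc y; rw [strBeqComm]; rfl, PySem.List.foldl_append_if]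
        rw [refFlat_append_singleton]
        simp
      rw [hinner, PySem.Set.add_of_not_mem hmem]
      refine ih (ks ++ [pyHead r]) ?_
      intro k hk
      rcases List.mem_append.mp hk with h | h
      · exact hks k h
      · rw [List.mem_singleton.mp h]; exact pyHead_idem r

theorem groups_getD (l : List String) (d : PySem.Dict String (List String)) (c : String) :
    (l.foldl (fun d x => d.modify (pyHead x) [] (· ++ [x])) d).getD c []
    = d.getD c [] ++ l.filter (fun x => pyHead x == c) := by
  induction l generalizing d with
  | nil => simp
  | cons x l ih =>
    simp only [List.foldl_cons, List.filter_cons]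
    rw [ih, PySem.Dict.getD_modify]
    by_cases h : c = pyHead x
    · simp [h]
    · simp [h, mt Eq.symm h]

theorem flatten_items (items : List (String × List String)) (acc : List String) :
    items.foldl (fun out p => (out ++ [p.1]) ++ p.2) acc
    = acc ++ items.flatMap (fun p => p.1 :: p.2) := by
  induction items generalizing acc with
  | nil => simp
  | cons p items _ => simp [List.flatMap_def]

theorem listB_eq (l : List String) :
    list_by_chr_alt l = refFlat l (PySem.Set.ofList (l.map pyHead)) := by
  show List.foldl (fun out p => (out ++ [p.1]) ++ p.2) []
      (l.foldl (fun d x => d.modify (pyHead x) [] (· ++ [x]))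
        (PySem.Dict.empty : PySem.Dict String (List String))).items
    = refFlat l (PySem.Set.ofList (l.map pyHead))
  have hnd : (l.foldl (fun d x => d.modify (pyHead x) [] (· ++ [x]))
      (PySem.Dict.empty : PySem.Dict String (List String))).keys.Nodup := by
    exact PySem.Dict.nodup_keys_foldl_modify_key l pyHead []
      (fun _ x => (· ++ [x])) PySem.Dict.empty (by simp)
  have hkeys : (l.foldl (fun d x => d.modify (pyHead x) [] (· ++ [x]))
      (PySem.Dict.empty : PySem.Dict String (List String))).keys
      = PySem.Set.ofList (l.map pyHead) := by
    rw [PySem.Dict.keys_foldl_modify_key l pyHead [] (fun _ x => (· ++ [x]))]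
    simp [PySem.Set.update_nil_left]
  rw [PySem.Dict.items_eq_map_keys _ hnd [], hkeys, flatten_items]
  unfold refFlat
  simp only [List.nil_append, List.flatMap_map]
  congr 1
  funext k
  rw [groups_getD]
  simp

-- ===== VERDICT (by name: the statement is the Claim_ definition above) =====
theorem list_by_chr_spec : Claim_equal_list_by_chr := by
  intro l _ _
  unfold Spec_list_by_chr list_by_chr
  rw [listB_eq]
  have h := listA_loop l l [] (by simp)
  simpa [refFlat, PySem.Set.update_nil_left] using h
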